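-- pv_equiv track=rewrite | github.com/allandominguez/neetcode-submissions-s7agif6v | Data Structures & Algorithms/string-encode-and-decode/submission-3.py | _get_str_len
-- ===== SOURCE A (Python) =====
-- def _get_str_len(s: str, cur: int) -> int:
--     this_cur = cur
--     str_len = ""
--     while this_cur < len(s):
--         if s[this_cur] == "#":
--             return int(str_len)
--         elif not s[this_cur].isdigit():
--             return 0
--         str_len += str(s[this_cur])
--         this_cur += 1
--     return 0
-- ===== SOURCE B (Python) =====
-- def _get_str_len(s: str, cur: int) -> int:
--     n = len(s)
--     end = cur
--     while end < n and s[end].isdigit():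
--         end += 1
--     if end < n and s[end] == "#":
--         return int("".join(s[j] for j in range(cur, end)))
--     return 0
-- ===== Notes on version B (the rewrite author's own statement) =====
-- stated objective: alternative
-- what changed: Replaces A's single interleaved loop that accumulates a digit string while branching on '#'/non-digit with a two-phase decomposition: first advance an index over the digit span, then check for the '#' delimiter and do one join+int conversion of the whole span.
import Mathlib
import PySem

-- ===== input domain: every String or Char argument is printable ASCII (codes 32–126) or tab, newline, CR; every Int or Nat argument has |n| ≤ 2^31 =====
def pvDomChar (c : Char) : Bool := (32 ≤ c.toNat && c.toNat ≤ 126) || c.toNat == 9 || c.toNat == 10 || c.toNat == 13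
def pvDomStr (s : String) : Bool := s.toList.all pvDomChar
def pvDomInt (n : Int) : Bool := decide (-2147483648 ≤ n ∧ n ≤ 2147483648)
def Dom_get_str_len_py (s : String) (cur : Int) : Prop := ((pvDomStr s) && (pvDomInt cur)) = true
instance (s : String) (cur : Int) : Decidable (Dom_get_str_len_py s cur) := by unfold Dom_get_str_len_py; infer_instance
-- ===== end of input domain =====

-- B replaces A's interleaved accumulate-and-branch loop by a two-phase decomposition
-- (scan the digit span first, then one join+int over that span); objective: alternative, same cost.


-- ===== PORT A =====
-- the while loop: state (this_cur, str_len); pyGet? = none (IndexError) and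
-- ofChars? = none (ValueError of int('')) are Python raises, excluded by Pre_ (port returns 0 there)
def getStrLenLoopA (cs : List Char) (thisCur : Int) (strLen : List Char) : Int :=
  if _h : thisCur < (cs.length : Int) then
    match PySem.List.pyGet? cs thisCur with
    | none => 0
    | some c =>
      if c = '#' then (PySem.Int.ofChars? strLen).getD 0
      else if ¬ PySem.Chars.isdigit c then 0
      else getStrLenLoopA cs (thisCur + 1) (strLen ++ [c])
  else 0
termination_by ((cs.length : Int) - thisCur).toNat
decreasing_by omega

def get_str_len_py (s : String) (cur : Int) : Int :=
  getStrLenLoopA s.toList cur []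

-- ===== PORT B =====
-- phase 1 of Source B: while end < n and s[end].isdigit(): end += 1
def getStrLenScanB (cs : List Char) (e : Int) : Int :=
  if _h : e < (cs.length : Int) ∧ (PySem.List.pyGet? cs e).any PySem.Chars.isdigit then
    getStrLenScanB cs (e + 1)
  else e
termination_by ((cs.length : Int) - e).toNat
decreasing_by omega

def get_str_len_py_alt (s : String) (cur : Int) : Int :=
  let cs := s.toList
  let e := getStrLenScanB cs cur
  if e < (cs.length : Int) ∧ PySem.List.pyGet? cs e = some '#' then
    -- int("".join(s[j] for j in range(cur, end))); every j here is a valid index, so pyGetD's default is never taken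
    (PySem.Int.ofChars? ((PySem.List.pyRange cur e 1).map
        (fun j => PySem.List.pyGetD cs j ' '))).getD 0
  else 0

-- ===== PRECONDITION & SPEC =====
-- Pre_ excludes exactly the inputs where Python A raises: IndexError when cur < -len(s) (with cur < len(s)),
-- and ValueError from int('') when s[cur] (Python wraparound) is '#'.
def Pre_get_str_len_py (s : String) (cur : Int) : Prop :=
  cur < (s.length : Int) →
    (PySem.Str.pyGet? s cur ≠ none ∧ PySem.Str.pyGet? s cur ≠ some '#')
instance (s : String) (cur : Int) : Decidable (Pre_get_str_len_py s cur) := by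
  unfold Pre_get_str_len_py; infer_instance

def pvWitness_get_str_len_py : String × Int := ("12#ab", 0)

def Spec_get_str_len_py (s : String) (cur : Int) (out : Int) : Prop := out = get_str_len_py_alt s cur
instance (s : String) (cur : Int) (out : Int) : Decidable (Spec_get_str_len_py s cur out) := by unfold Spec_get_str_len_py; infer_instance

-- ===== CLAIM =====
def Claim_equal_get_str_len_py : Prop :=
  ∀ (s : String) (cur : Int), Dom_get_str_len_py s cur → Pre_get_str_len_py s cur →
    Spec_get_str_len_py s cur (get_str_len_py s cur)

-- ===== LEMMAS AND PROOFS =====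
lemma scanB_stop (cs : List Char) (e : Int)
    (h : ¬ (e < (cs.length : Int) ∧ (PySem.List.pyGet? cs e).any PySem.Chars.isdigit)) :
    getStrLenScanB cs e = e := by
  rw [getStrLenScanB, dif_neg h]

lemma scanB_step (cs : List Char) (e : Int)
    (h : e < (cs.length : Int) ∧ (PySem.List.pyGet? cs e).any PySem.Chars.isdigit) :
    getStrLenScanB cs e = getStrLenScanB cs (e + 1) := by
  rw [getStrLenScanB, dif_pos h]

lemma scanB_le (cs : List Char) (e : Int) : e ≤ getStrLenScanB cs e := by
  rw [getStrLenScanB]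
  split
  · have := scanB_le cs (e + 1); omega
  · omega
termination_by ((cs.length : Int) - e).toNat
decreasing_by rename_i h; omega

lemma pyGetD_of_some {α : Type} (xs : List α) (i : Int) (c d : α)
    (h : PySem.List.pyGet? xs i = some c) : PySem.List.pyGetD xs i d = c := by
  simp only [PySem.List.pyGetD, PySem.List.pyGet?] at h ⊢
  cases hk : PySem.List.pyIdx? xs.length i <;> simp [hk] at h ⊢ <;> simp_all

-- main invariant: A's loop from position cur with accumulated digits acc equals
-- B's "scan span, then one conversion of acc ++ the span's characters"
lemma loopA_eq (cs : List Char) (cur : Int) (acc : List Char) :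
    getStrLenLoopA cs cur acc =
      if getStrLenScanB cs cur < (cs.length : Int) ∧
         PySem.List.pyGet? cs (getStrLenScanB cs cur) = some '#' then
        (PySem.Int.ofChars? (acc ++ (PySem.List.pyRange cur (getStrLenScanB cs cur) 1).map
            (fun j => PySem.List.pyGetD cs j ' '))).getD 0
      else 0 := by
  rw [getStrLenLoopA]
  by_cases hlt : cur < (cs.length : Int)
  · simp only [hlt, dite_true]
    cases hg : PySem.List.pyGet? cs cur with
    | none =>
        have hstop : getStrLenScanB cs cur = cur := scanB_stop cs cur (by simp [hg])
        simp [hstop, hg]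
    | some c =>
        by_cases hd : PySem.Chars.isdigit c
        · -- digit: c ≠ '#', loop recurses, scan steps
          have hc : c ≠ '#' := by
            intro h; subst h; exact absurd hd (by decide)
          have hstep : getStrLenScanB cs cur = getStrLenScanB cs (cur + 1) :=
            scanB_step cs cur (by simp [hg, hd, hlt])
          simp only [hc, if_false, hd, not_true, if_false]
          have hIH := loopA_eq cs (cur + 1) (acc ++ [c])
          rw [hIH, hstep]
          by_cases hfin : getStrLenScanB cs (cur + 1) < (cs.length : Int) ∧
              PySem.List.pyGet? cs (getStrLenScanB cs (cur + 1)) = some '#'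
          · rw [if_pos hfin, if_pos hfin]
            have hle : cur + 1 ≤ getStrLenScanB cs (cur + 1) := scanB_le cs (cur + 1)
            rw [show PySem.List.pyRange cur (getStrLenScanB cs (cur + 1)) 1
                  = cur :: PySem.List.pyRange (cur + 1) (getStrLenScanB cs (cur + 1)) 1
                from PySem.List.pyRange_one_cons (by omega), List.map_cons,
                pyGetD_of_some cs cur c ' ' hg]
            simp
          · rw [if_neg hfin, if_neg hfin]
        · -- not a digit: either '#' (both convert acc over an empty span) or return 0
          have hstop : getStrLenScanB cs cur = cur := scanB_stop cs cur (by simp [hg, hd])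
          by_cases hc : c = '#'
          · subst hc
            simp [hstop, hg, hlt, PySem.List.pyRange_one_eq_nil (le_refl cur)]
          · simp [hstop, hg, hc, hd]
  · have hstop : getStrLenScanB cs cur = cur := scanB_stop cs cur (by simp; omega)
    simp only [hlt, dite_false, hstop]
    rw [if_neg (fun hh => hh.1)]
termination_by ((cs.length : Int) - cur).toNat
decreasing_by omega

-- ===== VERDICT =====
theorem get_str_len_py_spec : Claim_equal_get_str_len_py := by
  intro s cur _hDom _hPre
  unfold Spec_get_str_len_py get_str_len_py get_str_len_py_alt
  simpa using loopA_eq s.toList cur []
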